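-- pv_equiv track=rewrite | github.com/monobook-ing/mcp | server.py | _extract_cuisine
-- ===== SOURCE A (Python) =====
-- from typing import Any, Optional
--
-- _IGNORED_TYPES = {"point_of_interest", "establishment", "food", "restaurant"}
--
-- def _extract_cuisine(types: Any) -> list[str]:
--     if not isinstance(types, list):
--         return []
--     labels: list[str] = []
--     for place_type in types:
--         if not isinstance(place_type, str) or place_type in _IGNORED_TYPES:
--             continue
--         label = place_type.replace("_", " ").strip().title()
--         if label and label not in labels:
--             labels.append(label)
--         if len(labels) >= 4:
--             break
--     return labels
-- ===== SOURCE B (Python) =====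
-- _IGNORED_TYPES = {"point_of_interest", "establishment", "food", "restaurant"}
--
-- def _unique_labels(types):
--     # Divide and conquer: ordered unique labels of a segment; merge keeps the
--     # left half's labels and appends the right half's labels not already seen.
--     if len(types) <= 1:
--         if not types:
--             return []
--         pt = types[0]
--         if not isinstance(pt, str) or pt in _IGNORED_TYPES:
--             return []
--         label = pt.replace("_", " ").strip().title()
--         return [label] if label else []
--     mid = len(types) // 2
--     left = _unique_labels(types[:mid])
--     right = _unique_labels(types[mid:])
--     return left + [l for l in right if l not in left]
--
-- def _extract_cuisine(types):
--     if not isinstance(types, list):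
--         return []
--     return _unique_labels(types)[:4]
-- ===== Notes on version B (the rewrite author's own statement) =====
-- stated objective: alternative
-- what changed: Replaced A's single left-to-right accumulating loop (running 'not in labels' scan, early break at 4) by a divide-and-conquer: recursively compute the ordered unique labels of each half of the list, merge by appending the right half's labels not present in the left, and slice the first four at the top; there is no accumulator and no early exit.
import Mathlib
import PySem

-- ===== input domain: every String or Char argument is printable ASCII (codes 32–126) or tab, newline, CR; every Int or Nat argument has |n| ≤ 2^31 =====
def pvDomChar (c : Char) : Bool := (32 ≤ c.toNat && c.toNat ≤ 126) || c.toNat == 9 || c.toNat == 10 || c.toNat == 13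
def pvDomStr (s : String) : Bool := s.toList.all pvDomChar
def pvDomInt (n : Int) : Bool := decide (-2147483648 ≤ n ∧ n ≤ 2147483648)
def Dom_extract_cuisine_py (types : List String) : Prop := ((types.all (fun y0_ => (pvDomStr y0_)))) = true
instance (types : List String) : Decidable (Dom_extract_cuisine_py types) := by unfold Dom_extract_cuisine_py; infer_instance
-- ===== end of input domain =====

-- B replaces A's accumulating loop (running membership scan, early break at 4) by a
-- divide-and-conquer over halves of the list, merging ordered unique labels (objective: alternative).

-- shared module context: the _IGNORED_TYPES set and the label formatting
-- pt.replace("_"," ").strip().title() (both Python versions use the same expressions)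
def ignoredTypes : PySem.Set String := ["point_of_interest", "establishment", "food", "restaurant"]

-- str.title() on the ASCII domain: a letter after a non-letter is uppercased,
-- a letter after a letter lowercased (exact for ASCII, where cased = alphabetic)
def titleAux : List Char → Bool → List Char
  | [], _ => []
  | c :: cs, prevCased =>
    if PySem.Chars.isalpha c then
      (if prevCased then PySem.Chars.lowerChar c else PySem.Chars.upperChar c) :: titleAux cs true
    else
      c :: titleAux cs false

def fmtLabel (pt : String) : String :=
  String.mk (titleAux (PySem.Chars.strip (PySem.Chars.replace pt.toList ['_'] [' '])) false)

-- ===== PORT A =====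
def extractLoopA : List String → List String → List String
  | [], labels => labels
  | place_type :: rest, labels =>
    if ignoredTypes.contains place_type then
      extractLoopA rest labels
    else
      let label := fmtLabel place_type
      let labels' := if label ≠ "" ∧ label ∉ labels then labels ++ [label] else labels
      if 4 ≤ labels'.length then labels' else extractLoopA rest labels'

def extract_cuisine_py (types : List String) : List String :=
  extractLoopA types []

-- ===== PORT B =====
-- _unique_labels: divide and conquer; types[:mid] / types[mid:] with mid = len//2
-- (0 ≤ mid ≤ len, so the slices are exactly take/drop)
def uniqueLabels (types : List String) : List String :=
  if _h : types.length ≤ 1 then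
    match types with
    | [] => []
    | pt :: _ =>
      if ignoredTypes.contains pt then []
      else
        let label := fmtLabel pt
        if label ≠ "" then [label] else []
  else
    let mid := types.length / 2
    let left := uniqueLabels (types.take mid)
    let right := uniqueLabels (types.drop mid)
    left ++ right.filter (fun l => !(left.contains l))
termination_by types.length
decreasing_by
  · simp [List.length_take]; omega
  · simp [List.length_drop]; omega

def extract_cuisine_py_alt (types : List String) : List String :=
  PySem.List.slice (uniqueLabels types) none (some 4)

-- ===== PRECONDITION & SPEC =====
def Spec_extract_cuisine_py (types : List String) (out : List String) : Prop := out = extract_cuisine_py_alt types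
instance (types : List String) (out : List String) : Decidable (Spec_extract_cuisine_py types out) := by unfold Spec_extract_cuisine_py; infer_instance

-- ===== CLAIM (what is proved, stated in full; the proofs are below) =====
def Claim_equal_extract_cuisine_py : Prop := ∀ (types : List String), Dom_extract_cuisine_py types → Spec_extract_cuisine_py types (extract_cuisine_py types)

-- ===== LEMMAS AND PROOFS =====

-- the stream of formatted candidate labels (shared characterisation of both ports)
def fmtStream (ts : List String) : List String :=
  ((ts.filter (fun pt => !(ignoredTypes.contains pt))).map fmtLabel).filter (fun l => !(l == ""))

lemma fmtStream_append (a b : List String) : fmtStream (a ++ b) = fmtStream a ++ fmtStream b := by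
  simp [fmtStream, List.filter_append, List.map_append]

-- Set.update only appends (never disturbs the existing elements)
lemma update_exists_append (xs : List String) : ∀ s : List String, ∃ t, PySem.Set.update s xs = s ++ t := by
  induction xs with
  | nil => intro s; exact ⟨[], by simp [PySem.Set.update]⟩
  | cons x xs ih =>
    intro s
    by_cases hc : x ∈ s
    · obtain ⟨t, ht⟩ := ih s
      exact ⟨t, by simpa [PySem.Set.update, PySem.Set.add, PySem.Set.contains, hc] using ht⟩
    · obtain ⟨t, ht⟩ := ih (s ++ [x])
      exact ⟨x :: t, by simpa [PySem.Set.update, PySem.Set.add, PySem.Set.contains, hc] using ht⟩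

-- updating s by a stream = s ++ (the stream's ordered dedup minus what s already has)
lemma update_eq_append_filter (a : List String) :
    ∀ s : List String, PySem.Set.update s a = s ++ (PySem.Set.update [] a).filter (fun l => !(s.contains l)) := by
  induction a with
  | nil => intro s; simp [PySem.Set.update]
  | cons x a ih =>
    intro s
    have hx : PySem.Set.update [] (x :: a) = PySem.Set.update [x] a := by
      simp [PySem.Set.update, PySem.Set.add, PySem.Set.contains]
    by_cases hc : x ∈ s
    · have hstep : PySem.Set.update s (x :: a) = PySem.Set.update s a := by
        simp [PySem.Set.update, PySem.Set.add, PySem.Set.contains, hc]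
      rw [hstep, ih s, hx, ih [x], List.filter_append]
      have h1 : List.filter (fun l => !(s.contains l)) [x] = [] := by simp [hc]
      rw [h1, List.filter_filter, List.nil_append]
      congr 1
      apply List.filter_congr
      intro l _
      by_cases hlx : l = x
      · subst hlx; simp [hc]
      · simp [hlx]
    · have hstep : PySem.Set.update s (x :: a) = PySem.Set.update (s ++ [x]) a := by
        simp [PySem.Set.update, PySem.Set.add, PySem.Set.contains, hc]
      rw [hstep, ih (s ++ [x]), hx, ih [x], List.filter_append]
      have h1 : List.filter (fun l => !(s.contains l)) [x] = [x] := by simp [hc]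
      rw [h1, List.filter_filter, List.append_assoc, List.singleton_append]
      congr 2
      apply List.filter_congr
      intro l _
      by_cases hlx : l = x
      · subst hlx; simp [hc]
      · simp [hlx]

-- the divide-and-conquer computes the ordered dedup of the formatted stream
lemma uniqueLabels_eq_aux (n : Nat) : ∀ ts : List String, ts.length ≤ n →
    uniqueLabels ts = PySem.Set.update [] (fmtStream ts) := by
  induction n with
  | zero =>
    intro ts h
    have : ts = [] := List.eq_nil_of_length_eq_zero (Nat.le_zero.mp h)
    subst this
    simp [uniqueLabels, fmtStream, PySem.Set.update]
  | succ n ih =>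
    intro ts h
    by_cases h1 : ts.length ≤ 1
    · rw [uniqueLabels, dif_pos h1]
      match ts, h1 with
      | [], _ => simp [fmtStream, PySem.Set.update]
      | [pt], _ =>
        by_cases hig : pt ∈ ignoredTypes
        · simp [fmtStream, PySem.Set.update, PySem.Set.contains, hig]
        · by_cases he : fmtLabel pt = ""
          · simp [fmtStream, PySem.Set.update, PySem.Set.contains, hig, he]
          · simp [fmtStream, PySem.Set.update, PySem.Set.add, PySem.Set.contains, hig, he]
    · rw [uniqueLabels, dif_neg h1]
      show uniqueLabels (ts.take (ts.length / 2)) ++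
          List.filter (fun l => !((uniqueLabels (ts.take (ts.length / 2))).contains l))
            (uniqueLabels (ts.drop (ts.length / 2))) = _
      rw [ih (ts.take (ts.length / 2)) (by simp [List.length_take]; omega),
          ih (ts.drop (ts.length / 2)) (by simp [List.length_drop]; omega)]
      conv_rhs => rw [← List.take_append_drop (ts.length / 2) ts]
      rw [fmtStream_append, PySem.Set.update_append]
      conv_rhs => rw [update_eq_append_filter]

lemma uniqueLabels_eq (ts : List String) : uniqueLabels ts = PySem.Set.update [] (fmtStream ts) :=
  uniqueLabels_eq_aux ts.length ts (Nat.le_refl _)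

-- A's loop with its running membership test and break computes the first four
-- elements of the ordered dedup continued from the labels accumulated so far
lemma extractLoopA_eq (ts : List String) : ∀ labels : List String, labels.length < 4 →
    extractLoopA ts labels = (PySem.Set.update labels (fmtStream ts)).take 4 := by
  induction ts with
  | nil =>
    intro labels h
    simp [extractLoopA, fmtStream, PySem.Set.update, List.take_of_length_le (Nat.le_of_lt h)]
  | cons pt rest ih =>
    intro labels h
    have hlen : ¬ 4 ≤ labels.length := by omega
    by_cases hig : pt ∈ ignoredTypes
    · simpa [extractLoopA, fmtStream, PySem.Set.contains, hig] using ih labels h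
    · by_cases he : fmtLabel pt = ""
      · simpa [extractLoopA, fmtStream, PySem.Set.contains, hig, he, hlen] using ih labels h
      · by_cases hmem : fmtLabel pt ∈ labels
        · have hadd : PySem.Set.add labels (fmtLabel pt) = labels := by
            simp [PySem.Set.add, PySem.Set.contains, hmem]
          simpa [extractLoopA, fmtStream, PySem.Set.contains, hig, he, hmem, hlen,
                 PySem.Set.update, hadd] using ih labels h
        · have hadd : PySem.Set.add labels (fmtLabel pt) = labels ++ [fmtLabel pt] := by
            simp [PySem.Set.add, PySem.Set.contains, hmem]
          by_cases hfull : 4 ≤ labels.length + 1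
          · have h3 : labels.length = 3 := by omega
            obtain ⟨t, ht⟩ := update_exists_append
              (((rest.filter (fun pt => !(ignoredTypes.contains pt))).map fmtLabel).filter
                (fun l => !(l == ""))) (labels ++ [fmtLabel pt])
            simp only [PySem.Set.update] at ht; simp at ht
            have h4 : (labels ++ [fmtLabel pt]).length = 4 := by simp [h3]
            simp only [extractLoopA, PySem.Set.contains, PySem.Set.update, fmtStream]
            simp only [List.filter_cons]
            simp [hig, he, hmem, ht, List.take_append, h3]
          · have h2 : (labels ++ [fmtLabel pt]).length < 4 := by simp; omega
            simpa [extractLoopA, fmtStream, PySem.Set.contains, hig, he, hmem, hfull,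
                   PySem.Set.update, hadd] using ih (labels ++ [fmtLabel pt]) h2

-- ===== VERDICT (by name: the statement is the Claim_ definition above) =====
theorem extract_cuisine_py_spec : Claim_equal_extract_cuisine_py := by
  intro types _
  unfold Spec_extract_cuisine_py extract_cuisine_py extract_cuisine_py_alt
  rw [extractLoopA_eq types [] (by simp)]
  rw [PySem.List.slice_to _ (by omega : (0:Int) ≤ 4)]
  rw [uniqueLabels_eq]
  rfl
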